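-- pv_equiv track=rewrite | github.com/BasilKarol/basic-CS-algorithms-in-python | lista_2/heap_sort_3.py | HEAPIFY3_PLUS
-- ===== SOURCE A (Python) =====
-- def v_sum( *vectors ):
--     dim = len( vectors[0] )
--     return ( sum(vector[i] for vector in vectors) for i in range(dim))
--
-- def HEAPIFY3_PLUS(A, i, i_stop):
--     przyp=0
--     por=0
--
--     left_i = i*3 + 1
--     middle_i = i*3 + 2
--     right_i = i*3 + 3
--     Largest = i
--
--     if left_i < len(A[:i_stop]):
--         if A[:i_stop][Largest] < A[:i_stop][left_i]:
--             Largest = left_i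
--
--     if middle_i < len(A[:i_stop]):
--         if A[:i_stop][Largest] < A[:i_stop][middle_i]:
--             Largest = middle_i
--
--     if right_i < len(A[:i_stop]):
--         if A[:i_stop][Largest] < A[:i_stop][right_i]:
--             Largest = right_i
--     por += 3
--
--     if i != Largest:
--         A[i], A[Largest] = A[Largest], A[i]
--         przyp += 3
--         przyp, por = v_sum(
--             HEAPIFY3_PLUS(A, Largest, i_stop),
--             (przyp, por)
--             )
--     return przyp, por
-- ===== SOURCE B (Python) =====
-- def HEAPIFY3_PLUS(A, i, i_stop):
--     # Candidate-list sift-down: take the slice once and keep it updated, and pick the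
--     # winner with max(key=...) over [i] + valid children instead of three guarded ifs.
--     # Like the original, it swaps elements of A in place.
--     przyp = 0
--     por = 0
--     s = A[:i_stop]
--     while True:
--         por += 3
--         kids = [c for c in range(i * 3 + 1, i * 3 + 4) if c < len(s)]
--         if not kids:
--             return przyp, por
--         Largest = max([i] + kids, key=lambda c: s[c])
--         if Largest == i:
--             return przyp, por
--         s[i], s[Largest] = s[Largest], s[i]
--         A[i], A[Largest] = A[Largest], A[i]
--         przyp += 3
--         i = Largest
-- ===== Notes on version B (the rewrite author's own statement) =====
-- stated objective: alternative
-- what changed: Replaces A's tail recursion (three guarded child comparisons per level, counters combined via the v_sum generator) with an iterative loop that slices once and picks the winning index with max([i] + valid children, key=lambda c: s[c]).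
-- outside the precondition, e.g. on HEAPIFY3_PLUS([9, 1, 2], -1, 3): A returns (6, 9), B returns (6, 9)
import Mathlib
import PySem

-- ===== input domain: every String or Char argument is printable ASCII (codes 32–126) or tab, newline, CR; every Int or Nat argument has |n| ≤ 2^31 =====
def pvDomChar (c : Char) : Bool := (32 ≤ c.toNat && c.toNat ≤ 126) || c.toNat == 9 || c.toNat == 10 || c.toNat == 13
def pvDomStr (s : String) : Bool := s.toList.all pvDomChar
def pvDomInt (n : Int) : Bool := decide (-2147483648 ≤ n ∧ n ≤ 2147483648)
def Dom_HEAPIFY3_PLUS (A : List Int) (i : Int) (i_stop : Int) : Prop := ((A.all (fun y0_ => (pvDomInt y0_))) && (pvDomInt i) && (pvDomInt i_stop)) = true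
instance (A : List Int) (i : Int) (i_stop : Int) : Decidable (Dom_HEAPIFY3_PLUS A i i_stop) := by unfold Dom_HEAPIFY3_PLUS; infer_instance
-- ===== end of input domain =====

-- B replaces A's per-level three guarded comparisons + tail recursion (counters combined
-- via a generator) with an iterative loop that slices once, builds the valid-children
-- candidate list and picks the winner with max(key=...); equivalence is about the RETURN
-- value only (both Pythons perform the same in-place swaps on A).


-- ===== PORT A =====
-- Literal port of A's recursion.  Reads `xs[k]` are `pyGetD xs k 0`: exact wherever
-- Python does not raise (Pre_ keeps only i ≥ 0, where every read performed is in range).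
-- The recursion is driven by fuel; on Pre_ the descent index strictly increases and is
-- bounded by A.length, so fuel A.length + 1 is never exhausted (the guard only makes
-- the same computation total).
def HEAPIFY3_PLUS.go : Nat → List Int → Int → Int → Int × Int
  | 0, _, _, _ => (0, 0)
  | fuel+1, A, i, i_stop =>
    let s := PySem.List.slice A none (some i_stop)      -- A[:i_stop]
    let left_i := i * 3 + 1
    let middle_i := i * 3 + 2
    let right_i := i * 3 + 3
    let L0 := i
    let L1 := if left_i < (s.length : Int) then
                (if PySem.List.pyGetD s L0 0 < PySem.List.pyGetD s left_i 0 then left_i else L0)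
              else L0
    let L2 := if middle_i < (s.length : Int) then
                (if PySem.List.pyGetD s L1 0 < PySem.List.pyGetD s middle_i 0 then middle_i else L1)
              else L1
    let Largest := if right_i < (s.length : Int) then
                (if PySem.List.pyGetD s L2 0 < PySem.List.pyGetD s right_i 0 then right_i else L2)
              else L2
    if i ≠ Largest then
      -- A[i], A[Largest] = A[Largest], A[i]
      let A' := PySem.List.pySetD (PySem.List.pySetD A i (PySem.List.pyGetD A Largest 0)) Largest (PySem.List.pyGetD A i 0)
      let r := HEAPIFY3_PLUS.go fuel A' Largest i_stop
      (r.1 + 3, r.2 + 3)                             -- v_sum(rec, (przyp, por)) with przyp=3, por=3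
    else
      (0, 3)

def HEAPIFY3_PLUS (A : List Int) (i : Int) (i_stop : Int) : Int × Int :=
  HEAPIFY3_PLUS.go (A.length + 1) A i i_stop

-- ===== PORT B =====
-- Literal port of Source B: the `while True` loop becomes fuel-driven tail recursion over
-- the once-taken slice s; the candidate children are range(i*3+1, i*3+4) filtered by
-- `c < len(s)`, and the winner is Python's max([i] + kids, key=lambda c: s[c]) =
-- PySem.List.max? (first maximal element); `.getD i` only totalises the Option (the
-- list i :: kids is never empty).  On Pre_ the index strictly increases and stays below
-- A.length, so fuel A.length + 1 is never exhausted.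
def HEAPIFY3_PLUS_alt.loop : Nat → List Int → Int → Int → Int → Int × Int
  | 0, _, _, przyp, por => (przyp, por)
  | fuel+1, s, i, przyp, por =>
    let por := por + 3
    let kids := (PySem.List.pyRange (i * 3 + 1) (i * 3 + 4)).filter (fun c => c < (s.length : Int))
    if kids = [] then (przyp, por)
    else
      let Largest := (PySem.List.max? (i :: kids) (fun c => PySem.List.pyGetD s c 0)).getD i
      if Largest = i then (przyp, por)
      else
        HEAPIFY3_PLUS_alt.loop fuel
          (PySem.List.pySetD (PySem.List.pySetD s i (PySem.List.pyGetD s Largest 0)) Largest (PySem.List.pyGetD s i 0))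
          Largest (przyp + 3) por

def HEAPIFY3_PLUS_alt (A : List Int) (i : Int) (i_stop : Int) : Int × Int :=
  HEAPIFY3_PLUS_alt.loop (A.length + 1) (PySem.List.slice A none (some i_stop)) i 0 0

-- ===== PRECONDITION & SPEC =====
-- Natural domain of a heap sift-down: the root index is nonnegative.  Pre_ excludes
-- all of i < 0, where Python A raises IndexError on part of the inputs (negative indices
-- out of range) and otherwise uses negative-index wraparound, a corner no caller of a
-- sift-down specifies.
def Pre_HEAPIFY3_PLUS (A : List Int) (i : Int) (i_stop : Int) : Prop := 0 ≤ i
instance (A : List Int) (i : Int) (i_stop : Int) : Decidable (Pre_HEAPIFY3_PLUS A i i_stop) := by unfold Pre_HEAPIFY3_PLUS; infer_instance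
def pvWitness_HEAPIFY3_PLUS : List Int × Int × Int := ([1, 5, 3, 4, 2, 0, 6], 0, 7)

def Spec_HEAPIFY3_PLUS (A : List Int) (i : Int) (i_stop : Int) (out : Int × Int) : Prop := out = HEAPIFY3_PLUS_alt A i i_stop
instance (A : List Int) (i : Int) (i_stop : Int) (out : Int × Int) : Decidable (Spec_HEAPIFY3_PLUS A i i_stop out) := by unfold Spec_HEAPIFY3_PLUS; infer_instance

-- ===== CLAIM (what is proved, stated in full; the proofs are below) =====
def Claim_equal_HEAPIFY3_PLUS : Prop := ∀ (A : List Int) (i : Int) (i_stop : Int), Dom_HEAPIFY3_PLUS A i i_stop → Pre_HEAPIFY3_PLUS A i i_stop → Spec_HEAPIFY3_PLUS A i i_stop (HEAPIFY3_PLUS A i i_stop)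

-- ===== LEMMAS AND PROOFS =====

-- A[:i_stop] is a prefix of A.
theorem pv_slice_eq_take (A : List Int) (j : Int) :
    PySem.List.slice A none (some j) = A.take (PySem.List.clampIdx A.length j) := by
  simp [PySem.List.slice]

-- In-range nonnegative read from a prefix = read from the full list.
theorem pv_pyGetD_take (A : List Int) (t : Nat) (k : Int) (d : Int)
    (h0 : 0 ≤ k) (h1 : k < ((A.take t).length : Int)) :
    PySem.List.pyGetD (A.take t) k d = PySem.List.pyGetD A k d := by
  have h1' : k < (A.length : Int) := by simp at h1; omega
  rw [PySem.List.pyGetD_eq_getElem _ d h0 h1, PySem.List.pyGetD_eq_getElem _ d h0 h1']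
  exact List.getElem_take

-- In-range nonnegative pySetD is List.set.
theorem pv_pySetD_eq_set (xs : List Int) (k : Int) (v : Int)
    (h0 : 0 ≤ k) (h1 : k < (xs.length : Int)) :
    PySem.List.pySetD xs k v = xs.set k.toNat v := by
  simp only [PySem.List.pySetD, PySem.List.pySet?, PySem.List.pyIdx?, if_pos h0, if_pos h1]
  rfl

-- Slicing commutes with an in-range write.
theorem pv_take_pySetD (A : List Int) (t : Nat) (k : Int) (v : Int)
    (h0 : 0 ≤ k) (h1 : k < ((A.take t).length : Int)) :
    (PySem.List.pySetD A k v).take t = PySem.List.pySetD (A.take t) k v := by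
  have h1' : k < (A.length : Int) := by simp at h1; omega
  rw [pv_pySetD_eq_set A k v h0 h1', pv_pySetD_eq_set (A.take t) k v h0 h1, List.take_set]

-- The two swapped states correspond: slicing A's post-swap list gives B's post-swap slice.
theorem pv_slice_swap (A : List Int) (i_stop i L : Int)
    (hi0 : 0 ≤ i) (hL0 : 0 ≤ L)
    (hi1 : i < (((PySem.List.slice A none (some i_stop)).length : Int)))
    (hL1 : L < (((PySem.List.slice A none (some i_stop)).length : Int))) :
    PySem.List.slice (PySem.List.pySetD (PySem.List.pySetD A i (PySem.List.pyGetD A L 0)) L (PySem.List.pyGetD A i 0)) none (some i_stop)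
      = PySem.List.pySetD (PySem.List.pySetD (PySem.List.slice A none (some i_stop)) i
          (PySem.List.pyGetD (PySem.List.slice A none (some i_stop)) L 0)) L
          (PySem.List.pyGetD (PySem.List.slice A none (some i_stop)) i 0) := by
  simp only [pv_slice_eq_take] at *
  set t := PySem.List.clampIdx A.length i_stop with ht
  have hlenA : i < (A.length : Int) := by simp at hi1; omega
  have hlenAL : L < (A.length : Int) := by simp at hL1; omega
  have hset1 : (PySem.List.pySetD A i (PySem.List.pyGetD A L 0)).length = A.length := by
    rw [pv_pySetD_eq_set _ _ _ hi0 hlenA]; simp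
  have e1 : PySem.List.clampIdx (PySem.List.pySetD (PySem.List.pySetD A i (PySem.List.pyGetD A L 0)) L (PySem.List.pyGetD A i 0)).length i_stop = t := by
    rw [pv_pySetD_eq_set _ _ _ hL0 (by rw [hset1]; exact hlenAL)]
    simp [hset1, ht]
  rw [e1]
  rw [pv_take_pySetD _ t L _ hL0 (by rw [pv_pySetD_eq_set _ _ _ hi0 hlenA]; simpa using hL1)]
  rw [pv_take_pySetD _ t i _ hi0 hi1]
  rw [pv_pyGetD_take A t L 0 hL0 hL1, pv_pyGetD_take A t i 0 hi0 hi1]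

-- range(i*3+1, i*3+4) = [i*3+1, i*3+2, i*3+3].
theorem pv_range3 (a : Int) : PySem.List.pyRange a (a + 3) = [a, a + 1, a + 2] := by
  rw [PySem.List.pyRange_one_cons (by omega), PySem.List.pyRange_one_cons (by omega),
      PySem.List.pyRange_one_cons (by omega)]
  simp [PySem.List.pyRange]
  omega

-- Python's max over a candidate list is the running-max fold: one combining step …
theorem pv_max?_step (key : Int → Int) (x y : Int) (t : List Int) :
    PySem.List.max? (x :: y :: t) key
      = PySem.List.max? ((if key x < key y then y else x) :: t) key := by
  simp only [PySem.List.max?, List.foldl]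
  by_cases c : key x < key y <;> simp [c]

-- … and the singleton base case.
theorem pv_max?_one (key : Int → Int) (x : Int) :
    PySem.List.max? [x] key = some x := by
  simp [PySem.List.max?, List.foldl]

theorem pv_loop_eq_go (fuel : Nat) :
    ∀ (A : List Int) (i_stop i przyp por : Int), 0 ≤ i →
      HEAPIFY3_PLUS_alt.loop fuel (PySem.List.slice A none (some i_stop)) i przyp por
        = ((HEAPIFY3_PLUS.go fuel A i i_stop).1 + przyp, (HEAPIFY3_PLUS.go fuel A i i_stop).2 + por) := by
  induction fuel with
  | zero =>
    intro A i_stop i przyp por _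
    simp [HEAPIFY3_PLUS_alt.loop, HEAPIFY3_PLUS.go]
  | succ fuel ih =>
    intro A i_stop i przyp por hi
    simp only [HEAPIFY3_PLUS_alt.loop, HEAPIFY3_PLUS.go]
    have hrange : PySem.List.pyRange (i * 3 + 1) (i * 3 + 4) = [i * 3 + 1, i * 3 + 2, i * 3 + 3] := by
      have h4 : i * 3 + 4 = (i * 3 + 1) + 3 := by ring
      rw [h4, pv_range3]; norm_num; omega
    rw [hrange]
    by_cases hl : i * 3 + 1 < ((PySem.List.slice A none (some i_stop)).length : Int)
    · by_cases hm : i * 3 + 2 < ((PySem.List.slice A none (some i_stop)).length : Int)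
      · by_cases hr : i * 3 + 3 < ((PySem.List.slice A none (some i_stop)).length : Int)
        · -- children i*3+1, i*3+2, i*3+3 all inside the slice
          simp only [List.filter, hl, hm, hr, decide_true, reduceCtorEq, if_false,
            if_pos, pv_max?_step, pv_max?_one, Option.getD_some]
          try dsimp only
          split_ifs <;>
            first
            | omega
            | (simp only [Prod.mk.injEq]; omega)
            | (rw [← pv_slice_swap A i_stop i (i*3+1) hi (by omega) (by omega) (by omega), ih] <;>
                first | omega | (dsimp only; simp only [Prod.mk.injEq]; constructor <;> ring))
            | (rw [← pv_slice_swap A i_stop i (i*3+2) hi (by omega) (by omega) (by omega), ih] <;>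
                first | omega | (dsimp only; simp only [Prod.mk.injEq]; constructor <;> ring))
            | (rw [← pv_slice_swap A i_stop i (i*3+3) hi (by omega) (by omega) (by omega), ih] <;>
                first | omega | (dsimp only; simp only [Prod.mk.injEq]; constructor <;> ring))
        · -- only i*3+1 and i*3+2 inside
          simp only [List.filter, hl, hm, hr, decide_true, decide_false, reduceCtorEq, if_false,
            if_pos, pv_max?_step, pv_max?_one, Option.getD_some]
          try dsimp only
          split_ifs <;>
            first
            | omega
            | (simp only [Prod.mk.injEq]; omega)
            | (rw [← pv_slice_swap A i_stop i (i*3+1) hi (by omega) (by omega) (by omega), ih] <;>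
                first | omega | (dsimp only; simp only [Prod.mk.injEq]; constructor <;> ring))
            | (rw [← pv_slice_swap A i_stop i (i*3+2) hi (by omega) (by omega) (by omega), ih] <;>
                first | omega | (dsimp only; simp only [Prod.mk.injEq]; constructor <;> ring))
      · -- only i*3+1 inside
        have hr : ¬ (i * 3 + 3 < ((PySem.List.slice A none (some i_stop)).length : Int)) := by omega
        simp only [List.filter, hl, hm, hr, decide_true, decide_false, reduceCtorEq, if_false,
          if_pos, pv_max?_step, pv_max?_one, Option.getD_some]
        try dsimp only
        split_ifs <;>
          first
          | omega
          | (simp only [Prod.mk.injEq]; omega)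
          | (rw [← pv_slice_swap A i_stop i (i*3+1) hi (by omega) (by omega) (by omega), ih] <;>
              first | omega | (dsimp only; simp only [Prod.mk.injEq]; constructor <;> ring))
    · -- no valid child: one comparison round, no swap
      have hm : ¬ (i * 3 + 2 < ((PySem.List.slice A none (some i_stop)).length : Int)) := by omega
      have hr : ¬ (i * 3 + 3 < ((PySem.List.slice A none (some i_stop)).length : Int)) := by omega
      simp only [List.filter, hl, hm, hr, decide_false]
      simp [Prod.ext_iff]
      try omega

-- ===== VERDICT (by name: the statement is the Claim_ definition above) =====
theorem HEAPIFY3_PLUS_spec : Claim_equal_HEAPIFY3_PLUS := by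
  intro A i i_stop _ hpre
  unfold Spec_HEAPIFY3_PLUS HEAPIFY3_PLUS HEAPIFY3_PLUS_alt
  rw [pv_loop_eq_go _ A i_stop i 0 0 hpre]
  simp
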